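-- pv_equiv track=rewrite | github.com/hjdjoo/anatomylens | scripts/export_anatomy.py | normalize_mesh_id
-- ===== SOURCE A (Python) =====
-- def normalize_mesh_id(name: str) -> str:
--     """
--     Convert Z-Anatomy name to normalized mesh ID.
--     Preserves side information (_l/_r).
--     """
--     clean = name.lower()
--
--     # Convert side suffixes to standardized format
--     side_suffix = None
--     for suffix, normalized in [(".l", "_l"), (".r", "_r")]:
--         if clean.endswith(suffix):
--             clean = clean[:-len(suffix)]
--             side_suffix = normalized
--             break
--
--     # Normalize characters
--     clean = clean.replace(" ", "_").replace("-", "_").replace(".", "_")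
--     clean = clean.replace("(", "").replace(")", "")
--     while "__" in clean:
--         clean = clean.replace("__", "_")
--     clean = clean.strip("_")
--
--     if side_suffix:
--         clean = clean + side_suffix
--
--     return clean
-- ===== SOURCE B (Python) =====
-- def normalize_mesh_id(name: str) -> str:
--     """Single-pass normalization: one scan with a pending-separator flag
--     replaces A's chained replaces, the '__'-collapsing while loop and strip."""
--     clean = name.lower()
--
--     if clean.endswith(".l"):
--         clean = clean[:-2]
--         side_suffix = "_l"
--     elif clean.endswith(".r"):
--         clean = clean[:-2]
--         side_suffix = "_r"
--     else:
--         side_suffix = None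
--
--     out = []
--     pending = False
--     for ch in clean:
--         if ch == ' ' or ch == '-' or ch == '.' or ch == '_':
--             pending = True
--         elif ch == '(' or ch == ')':
--             pass
--         else:
--             if pending and out:
--                 out.append('_')
--             out.append(ch)
--             pending = False
--
--     result = "".join(out)
--     if side_suffix:
--         result = result + side_suffix
--     return result
-- ===== Notes on version B (the rewrite author's own statement) =====
-- stated objective: simpler
-- what changed: Replaced the three chained replace calls, the double-underscore-collapsing while loop and the edge strip by a single left-to-right scan with a pending-separator flag that collapses separator runs, drops parentheses and trims edge underscores in one pass.
import Mathlib
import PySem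

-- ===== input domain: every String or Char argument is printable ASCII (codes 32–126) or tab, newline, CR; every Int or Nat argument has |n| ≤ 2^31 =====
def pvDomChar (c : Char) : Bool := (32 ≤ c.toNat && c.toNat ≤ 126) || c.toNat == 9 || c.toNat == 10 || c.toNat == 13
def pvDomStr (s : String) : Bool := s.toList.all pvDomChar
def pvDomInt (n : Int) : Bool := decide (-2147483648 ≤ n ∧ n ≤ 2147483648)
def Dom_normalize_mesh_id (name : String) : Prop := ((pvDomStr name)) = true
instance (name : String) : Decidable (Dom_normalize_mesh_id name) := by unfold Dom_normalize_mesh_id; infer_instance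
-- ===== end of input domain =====

-- B replaces A's chained .replace calls, the '__'-collapsing while loop and
-- strip('_') by a single scan with a pending-separator flag (objective: simpler).

-- ===== PORT A =====

-- termination infrastructure for A's `while "__" in clean` loop (cited by the port)
def pvRep2 : List Char → List Char
  | a :: b :: t => if a = '_' ∧ b = '_' then '_' :: pvRep2 t else a :: pvRep2 (b :: t)
  | l => l

theorem pvPre2_iff (a b : Char) (t : List Char) :
    (['_', '_'].isPrefixOf (a :: b :: t) = true) ↔ (a = '_' ∧ b = '_') := by
  simp [List.isPrefixOf_iff_prefix, List.cons_prefix_cons]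
  constructor
  · rintro ⟨h1, h2⟩; exact ⟨h1.symm, h2.symm⟩
  · rintro ⟨h1, h2⟩; exact ⟨h1.symm, h2.symm⟩

theorem pvGo2_eq : ∀ (fuel : Nat) (l acc : List Char), l.length ≤ fuel →
    PySem.Chars.replace.go ['_', '_'] ['_'] fuel l acc = acc.reverse ++ pvRep2 l := by
  intro fuel
  induction fuel with
  | zero =>
    intro l acc h
    have : l = [] := by cases l <;> simp_all
    subst this; simp [PySem.Chars.replace.go, pvRep2]
  | succ n ih =>
    intro l acc h
    match l with
    | [] => simp [PySem.Chars.replace.go, pvRep2]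
    | [a] =>
      simp only [PySem.Chars.replace.go]
      have hpre : ¬ (['_', '_'].isPrefixOf [a] = true) := by
        simp [List.isPrefixOf_iff_prefix]
      rw [if_neg hpre, ih [] (a :: acc) (by simp)]
      simp [pvRep2]
    | a :: b :: t =>
      simp only [PySem.Chars.replace.go]
      by_cases hab : a = '_' ∧ b = '_'
      · obtain ⟨ha, hb⟩ := hab; subst ha; subst hb
        rw [if_pos ((pvPre2_iff _ _ _).mpr ⟨rfl, rfl⟩)]
        have ht : t.length ≤ n := by simp at h; omega
        rw [show List.drop ['_', '_'].length ('_' :: '_' :: t) = t from rfl, ih t _ ht]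
        simp [pvRep2]
      · rw [if_neg (fun hp => hab ((pvPre2_iff _ _ _).mp hp)),
            ih (b :: t) (a :: acc) (by simp at h ⊢; omega)]
        simp only [pvRep2, if_neg hab]
        simp

theorem pvReplace2_eq (l : List Char) :
    PySem.Chars.replace l ['_', '_'] ['_'] = pvRep2 l := by
  rw [PySem.Chars.replace, if_neg (by simp), pvGo2_eq l.length l [] (le_refl _)]
  simp

theorem pvRep2_length_le : ∀ l : List Char, (pvRep2 l).length ≤ l.length := by
  intro l
  induction l using pvRep2.induct with
  | case1 a b t hab ih => simp only [pvRep2, if_pos hab]; simp only [List.length_cons]; omega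
  | case2 a b t hab ih => simp only [pvRep2, if_neg hab]; simpa using ih
  | case3 l h1 =>
    cases l with
    | nil => simp [pvRep2]
    | cons a t =>
      cases t with
      | nil => simp [pvRep2]
      | cons b u => exact absurd rfl (h1 a b u)

theorem pvRep2_length_lt : ∀ l : List Char, ['_', '_'] <:+: l →
    (pvRep2 l).length < l.length := by
  intro l
  induction l using pvRep2.induct with
  | case1 a b t hab ih =>
    intro _
    have := pvRep2_length_le t
    simp only [pvRep2, if_pos hab]
    simp; omega
  | case2 a b t hab ih =>
    intro hinf
    have hnp : ¬ (['_', '_'] <+: a :: b :: t) := by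
      intro hp
      simp [List.cons_prefix_cons] at hp
      exact hab ⟨hp.1.symm, hp.2.symm⟩
    have hi : ['_', '_'] <:+: b :: t := (List.infix_cons_iff.mp hinf).resolve_left hnp
    simp only [pvRep2, if_neg hab]
    simpa using ih hi
  | case3 l h1 =>
    intro hinf
    have hle := hinf.length_le
    cases l with
    | nil => simp at hle
    | cons a t =>
      cases t with
      | nil => simp at hle
      | cons b u => exact absurd rfl (h1 a b u)

theorem pvWhile_dec (s : String) (h : PySem.Str.isIn "__" s = true) :
    (PySem.Str.replace s "__" "_").toList.length < s.toList.length := by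
  have hinf : ['_', '_'] <:+: s.toList := by
    have := (PySem.Str.isIn_iff_infix "__" s).mp h
    simpa using this
  rw [PySem.Str.toList_replace]
  show (PySem.Chars.replace s.toList ['_', '_'] ['_']).length < _
  rw [pvReplace2_eq]
  exact pvRep2_length_lt s.toList hinf

-- `for suffix, normalized in [(".l","_l"),(".r","_r")]: if clean.endswith(suffix): …; break`
def pvSideLoop : List (String × String) → String → String × Option String
  | [], clean => (clean, none)
  | (suffix, normalized) :: rest, clean =>
    if PySem.Str.endswith clean suffix then
      (PySem.Str.slice clean none (some (-(PySem.Str.len suffix))), some normalized)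
    else pvSideLoop rest clean

-- `while "__" in clean: clean = clean.replace("__", "_")`
def pvWhileCollapse (s : String) : String :=
  if h : PySem.Str.isIn "__" s = true then
    pvWhileCollapse (PySem.Str.replace s "__" "_")
  else s
termination_by s.toList.length
decreasing_by exact pvWhile_dec s h

def normalize_mesh_id (name : String) : String :=
  let clean0 := PySem.Str.lower name
  let p := pvSideLoop [(".l", "_l"), (".r", "_r")] clean0
  let clean2 := PySem.Str.replace (PySem.Str.replace (PySem.Str.replace p.1 " " "_") "-" "_") "." "_"
  let clean3 := PySem.Str.replace (PySem.Str.replace clean2 "(" "") ")" ""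
  let clean4 := pvWhileCollapse clean3
  let clean5 := PySem.Str.stripChars clean4 "_"
  match p.2 with
  | some suf => clean5 ++ suf
  | none => clean5

-- ===== PORT B =====

-- loop body: a separator sets the pending flag, parens are dropped, any other
-- character emits '_' first iff pending and the output is nonempty
def pvScanStep (st : List Char × Bool) (ch : Char) : List Char × Bool :=
  if ch == ' ' || ch == '-' || ch == '.' || ch == '_' then (st.1, true)
  else if ch == '(' || ch == ')' then st
  else (st.1 ++ (if st.2 && !st.1.isEmpty then ['_', ch] else [ch]), false)

def normalize_mesh_id_alt (name : String) : String :=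
  let clean0 := PySem.Str.lower name
  let p :=
    if PySem.Str.endswith clean0 ".l" then (PySem.Str.slice clean0 none (some (-2)), some "_l")
    else if PySem.Str.endswith clean0 ".r" then (PySem.Str.slice clean0 none (some (-2)), some "_r")
    else (clean0, (none : Option String))
  let result := String.ofList ((p.1.toList.foldl pvScanStep ([], false)).1)
  match p.2 with
  | some suf => result ++ suf
  | none => result

-- ===== PRECONDITION & SPEC =====
def Spec_normalize_mesh_id (name : String) (out : String) : Prop := out = normalize_mesh_id_alt name
instance (name : String) (out : String) : Decidable (Spec_normalize_mesh_id name out) := by unfold Spec_normalize_mesh_id; infer_instance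

-- ===== CLAIM (what is proved, stated in full; the proofs are below) =====
def Claim_equal_normalize_mesh_id : Prop := ∀ (name : String), Dom_normalize_mesh_id name → Spec_normalize_mesh_id name (normalize_mesh_id name)

-- ===== LEMMAS AND PROOFS =====

-- canonical "collapse runs of '_'" function
def pvSquash : List Char → List Char
  | a :: b :: t => if a = '_' ∧ b = '_' then pvSquash (b :: t) else a :: pvSquash (b :: t)
  | l => l

theorem pvSquash_cons_ne {a : Char} (h : a ≠ '_') (l : List Char) :
    pvSquash (a :: l) = a :: pvSquash l := by
  cases l with
  | nil => rfl
  | cons b t =>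
    simp only [pvSquash]
    rw [if_neg (fun hh => h hh.1)]

theorem pvSquash_cons2_underscore (b : List Char) :
    pvSquash ('_' :: '_' :: b) = pvSquash ('_' :: b) := by
  conv_lhs => rw [pvSquash]
  simp

theorem pvSquash_underscore_cons_ne {c : Char} (h : c ≠ '_') (l : List Char) :
    pvSquash ('_' :: c :: l) = '_' :: pvSquash (c :: l) := by
  simp only [pvSquash]
  rw [if_neg (fun hh => h hh.2)]

theorem pvSquash_rep2 : ∀ l : List Char,
    pvSquash (pvRep2 l) = pvSquash l ∧
    pvSquash ('_' :: pvRep2 l) = pvSquash ('_' :: l) := by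
  intro l
  induction l using pvRep2.induct with
  | case1 a b t hab ih =>
    obtain ⟨ha, hb⟩ := hab; subst ha; subst hb
    rw [show pvRep2 ('_' :: '_' :: t) = '_' :: pvRep2 t from by
          conv_lhs => rw [pvRep2]
          simp]
    refine ⟨?_, ?_⟩
    · rw [ih.2, pvSquash_cons2_underscore]
    · rw [pvSquash_cons2_underscore, ih.2, pvSquash_cons2_underscore,
          pvSquash_cons2_underscore]
  | case2 a b t hab ih =>
    rw [show pvRep2 (a :: b :: t) = a :: pvRep2 (b :: t) from by
          simp only [pvRep2, if_neg hab]]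
    by_cases ha : a = '_'
    · subst ha
      refine ⟨ih.2, ?_⟩
      rw [pvSquash_cons2_underscore, ih.2, pvSquash_cons2_underscore]
    · refine ⟨?_, ?_⟩
      · rw [pvSquash_cons_ne ha, pvSquash_cons_ne ha, ih.1]
      · rw [pvSquash_underscore_cons_ne ha, pvSquash_cons_ne ha, ih.1,
            pvSquash_underscore_cons_ne ha, pvSquash_cons_ne ha]
  | case3 l h1 =>
    cases l with
    | nil => exact ⟨rfl, rfl⟩
    | cons a t =>
      cases t with
      | nil => exact ⟨rfl, rfl⟩
      | cons b u => exact absurd rfl (h1 a b u)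

theorem pvSquash_nodouble : ∀ l : List Char, ¬ (['_', '_'] <:+: l) → pvSquash l = l := by
  intro l
  induction l using pvSquash.induct with
  | case1 a b t hab ih =>
    intro h
    exact absurd (List.infix_cons_iff.mpr
      (Or.inl ⟨t, by simp [hab.1, hab.2]⟩)) h
  | case2 a b t hab ih =>
    intro h
    simp only [pvSquash]
    rw [if_neg hab, ih fun hi => h (List.infix_cons_iff.mpr (Or.inr hi))]
  | case3 l h1 =>
    intro _
    cases l with
    | nil => rfl
    | cons a t =>
      cases t with
      | nil => rfl
      | cons b u => exact absurd rfl (h1 a b u)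

theorem pvWhileCollapse_toList (s : String) :
    (pvWhileCollapse s).toList = pvSquash s.toList := by
  rw [pvWhileCollapse]
  by_cases h : PySem.Str.isIn "__" s = true
  · rw [dif_pos h, pvWhileCollapse_toList (PySem.Str.replace s "__" "_"),
        PySem.Str.toList_replace]
    show pvSquash (PySem.Chars.replace s.toList ['_', '_'] ['_']) = _
    rw [pvReplace2_eq]
    exact (pvSquash_rep2 s.toList).1
  · rw [dif_neg h]
    have hni : ¬ (['_', '_'] <:+: s.toList) := by
      intro hinf
      exact h ((PySem.Str.isIn_iff_infix "__" s).mpr (by simpa using hinf))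
    exact (pvSquash_nodouble s.toList hni).symm
termination_by s.toList.length
decreasing_by exact pvWhile_dec s h

-- single-character replace = flatMap
theorem pvGo1_eq (a : Char) (new : List Char) :
    ∀ (fuel : Nat) (l acc : List Char), l.length ≤ fuel →
    PySem.Chars.replace.go [a] new fuel l acc =
      acc.reverse ++ l.flatMap (fun c => if c = a then new else [c]) := by
  intro fuel
  induction fuel with
  | zero =>
    intro l acc h
    have : l = [] := by cases l <;> simp_all
    subst this; simp [PySem.Chars.replace.go]
  | succ n ih =>
    intro l acc h
    cases l with
    | nil => simp [PySem.Chars.replace.go]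
    | cons c t =>
      simp only [PySem.Chars.replace.go]
      have hiff : ([a].isPrefixOf (c :: t) = true) ↔ a = c := by
        simp [List.isPrefixOf_iff_prefix, List.cons_prefix_cons]
      by_cases hc : c = a
      · subst hc
        rw [if_pos (hiff.mpr rfl),
            show List.drop [c].length (c :: t) = t from rfl,
            ih t _ (by simp at h; omega)]
        simp
      · rw [if_neg (fun hp => hc (hiff.mp hp).symm), ih t _ (by simp at h; omega)]
        simp [hc]

theorem pvReplace1_eq (l : List Char) (a : Char) (new : List Char) :
    PySem.Chars.replace l [a] new = l.flatMap (fun c => if c = a then new else [c]) := by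
  rw [PySem.Chars.replace, if_neg (by simp), pvGo1_eq a new l.length l [] (le_refl _)]
  simp

-- per-character effect of A's replace chain
def pvF (c : Char) : List Char :=
  if c = ' ' ∨ c = '-' ∨ c = '.' ∨ c = '_' then ['_']
  else if c = '(' ∨ c = ')' then []
  else [c]

theorem pvChain_eq (s : String) :
    (PySem.Str.replace (PySem.Str.replace
      (PySem.Str.replace (PySem.Str.replace (PySem.Str.replace s " " "_") "-" "_") "." "_")
      "(" "") ")" "").toList = s.toList.flatMap pvF := by
  simp only [PySem.Str.toList_replace]
  show PySem.Chars.replace (PySem.Chars.replace (PySem.Chars.replace (PySem.Chars.replace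
      (PySem.Chars.replace s.toList [' '] ['_']) ['-'] ['_']) ['.'] ['_']) ['('] []) [')'] []
      = _
  simp only [pvReplace1_eq]
  induction s.toList with
  | nil => rfl
  | cons c t ih =>
    simp only [List.flatMap_cons, ← ih]
    by_cases h1 : c = ' '
    · subst h1; rfl
    by_cases h2 : c = '-'
    · subst h2; rfl
    by_cases h3 : c = '.'
    · subst h3; rfl
    by_cases h4 : c = '_'
    · subst h4; rfl
    by_cases h5 : c = '('
    · subst h5; rfl
    by_cases h6 : c = ')'
    · subst h6; rfl
    simp [pvF, h1, h2, h3, h4, h5, h6]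

-- B's scan, rephrased as two recursive phases (before/after the first emitted char)
def pvPassRest : List Char → Bool → List Char
  | [], _ => []
  | c :: t, p =>
    if c = ' ' ∨ c = '-' ∨ c = '.' ∨ c = '_' then pvPassRest t true
    else if c = '(' ∨ c = ')' then pvPassRest t p
    else (if p then ['_'] else []) ++ c :: pvPassRest t false

def pvPassLead : List Char → List Char
  | [] => []
  | c :: t =>
    if c = ' ' ∨ c = '-' ∨ c = '.' ∨ c = '_' then pvPassLead t
    else if c = '(' ∨ c = ')' then pvPassLead t
    else c :: pvPassRest t false

theorem pvFoldl_scan_ne : ∀ (t out : List Char) (p : Bool), out ≠ [] →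
    (t.foldl pvScanStep (out, p)).1 = out ++ pvPassRest t p := by
  intro t
  induction t with
  | nil => intro out p h; simp [pvPassRest]
  | cons c u ih =>
    intro out p h
    simp only [List.foldl_cons]
    by_cases hs : c = ' ' ∨ c = '-' ∨ c = '.' ∨ c = '_'
    · rw [show pvScanStep (out, p) c = (out, true) from by
            simp only [pvScanStep]; rw [if_pos (by rcases hs with h | h | h | h <;> simp [h])],
          ih out true h, pvPassRest, if_pos hs]
    by_cases hp : c = '(' ∨ c = ')'
    · rw [show pvScanStep (out, p) c = (out, p) from by
            simp only [pvScanStep]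
            push_neg at hs
            rw [if_neg (by simp [hs.1, hs.2.1, hs.2.2.1, hs.2.2.2]),
                if_pos (by rcases hp with h | h <;> simp [h])],
          ih out p h, pvPassRest, if_neg hs, if_pos hp]
    · rw [show pvScanStep (out, p) c = (out ++ (if p then ['_', c] else [c]), false) from by
            simp only [pvScanStep]
            push_neg at hs hp
            rw [if_neg (by simp [hs.1, hs.2.1, hs.2.2.1, hs.2.2.2]),
                if_neg (by simp [hp.1, hp.2])]
            have : out.isEmpty = false := by simpa [List.isEmpty_iff] using h
            cases p <;> simp [this],
          ih _ false (by cases p <;> simp),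
          pvPassRest, if_neg hs, if_neg hp]
      cases p <;> simp

theorem pvFoldl_scan_nil : ∀ (t : List Char) (p : Bool),
    (t.foldl pvScanStep ([], p)).1 = pvPassLead t := by
  intro t
  induction t with
  | nil => intro p; simp [pvPassLead]
  | cons c u ih =>
    intro p
    simp only [List.foldl_cons]
    by_cases hs : c = ' ' ∨ c = '-' ∨ c = '.' ∨ c = '_'
    · rw [show pvScanStep (([] : List Char), p) c = ([], true) from by
            simp only [pvScanStep]; rw [if_pos (by rcases hs with h | h | h | h <;> simp [h])],
          ih true, pvPassLead, if_pos hs]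
    by_cases hp : c = '(' ∨ c = ')'
    · rw [show pvScanStep (([] : List Char), p) c = ([], p) from by
            simp only [pvScanStep]
            push_neg at hs
            rw [if_neg (by simp [hs.1, hs.2.1, hs.2.2.1, hs.2.2.2]),
                if_pos (by rcases hp with h | h <;> simp [h])],
          ih p, pvPassLead, if_neg hs, if_pos hp]
    · rw [show pvScanStep (([] : List Char), p) c = ([c], false) from by
            simp only [pvScanStep]
            push_neg at hs hp
            rw [if_neg (by simp [hs.1, hs.2.1, hs.2.2.1, hs.2.2.2]),
                if_neg (by simp [hp.1, hp.2])]
            cases p <;> simp,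
          pvFoldl_scan_ne u [c] false (by simp),
          pvPassLead, if_neg hs, if_neg hp]
      rfl

-- strip pieces
def pvP : Char → Bool := fun c => ['_'].contains c

def pvRstrip (l : List Char) : List Char := (List.dropWhile pvP l.reverse).reverse

theorem pvP_ne {c : Char} (h : c ≠ '_') : pvP c = false := by
  simp [pvP, h]

theorem pvDropWhile_keep {c : Char} (h : pvP c = false) (x y : List Char) :
    List.dropWhile pvP (x ++ c :: y) = List.dropWhile pvP x ++ c :: y := by
  rw [List.dropWhile_append]
  by_cases he : (List.dropWhile pvP x).isEmpty = true
  · rw [if_pos he]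
    simp only [List.isEmpty_iff] at he
    rw [he, List.dropWhile_cons_of_neg (by simp [h])]
    simp
  · rw [if_neg he]

theorem pvRstrip_append {c : Char} (h : c ≠ '_') (x y : List Char) :
    pvRstrip (x ++ c :: y) = x ++ c :: pvRstrip y := by
  unfold pvRstrip
  rw [show (x ++ c :: y).reverse = y.reverse ++ c :: x.reverse from by simp,
      pvDropWhile_keep (pvP_ne h)]
  simp

theorem pvStripChars_eq (l : List Char) :
    PySem.Chars.stripChars l ['_'] = pvRstrip (List.dropWhile pvP l) := by
  rfl

theorem pvStrip_cons_underscore (l : List Char) :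
    PySem.Chars.stripChars ('_' :: l) ['_'] = PySem.Chars.stripChars l ['_'] := by
  rw [pvStripChars_eq, pvStripChars_eq, List.dropWhile_cons_of_pos (by simp [pvP])]

theorem pvRstrip_cons_ne {c : Char} (h : c ≠ '_') (y : List Char) :
    pvRstrip (c :: y) = c :: pvRstrip y := by
  simpa using pvRstrip_append h [] y

theorem pvRstrip_underscore_cons_ne {c : Char} (h : c ≠ '_') (y : List Char) :
    pvRstrip ('_' :: c :: y) = '_' :: c :: pvRstrip y := by
  simpa using pvRstrip_append h ['_'] y

theorem pvStrip_cons_ne {c : Char} (h : c ≠ '_') (l : List Char) :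
    PySem.Chars.stripChars (c :: l) ['_'] = c :: pvRstrip l := by
  rw [pvStripChars_eq, List.dropWhile_cons_of_neg (by simp [pvP, h])]
  exact pvRstrip_append h [] l

-- the two scan phases against rstrip∘squash of the flatMap image
theorem pvPassRest_eq : ∀ t : List Char,
    pvPassRest t false = pvRstrip (pvSquash (t.flatMap pvF)) ∧
    pvPassRest t true = pvRstrip (pvSquash ('_' :: t.flatMap pvF)) := by
  intro t
  induction t with
  | nil => exact ⟨by decide, by decide⟩
  | cons c u ih =>
    by_cases hs : c = ' ' ∨ c = '-' ∨ c = '.' ∨ c = '_'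
    · have hf : pvF c = ['_'] := by simp [pvF, hs]
      refine ⟨?_, ?_⟩
      · rw [pvPassRest, if_pos hs, ih.2]
        simp [hf]
      · rw [pvPassRest, if_pos hs, ih.2]
        simp only [List.flatMap_cons, hf, List.singleton_append]
        rw [pvSquash_cons2_underscore]
    by_cases hp : c = '(' ∨ c = ')'
    · have hf : pvF c = [] := by
        push_neg at hs
        simp [pvF, hs.1, hs.2.1, hs.2.2.1, hs.2.2.2, hp]
      refine ⟨?_, ?_⟩
      · rw [pvPassRest, if_neg hs, if_pos hp, ih.1]; simp [hf]
      · rw [pvPassRest, if_neg hs, if_pos hp, ih.2]; simp [hf]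
    · push_neg at hs hp
      have hne : c ≠ '_' := hs.2.2.2
      have hf : pvF c = [c] := by
        simp [pvF, hs.1, hs.2.1, hs.2.2.1, hs.2.2.2, hp.1, hp.2]
      refine ⟨?_, ?_⟩
      · rw [pvPassRest, if_neg (by push_neg; exact hs), if_neg (by push_neg; exact hp), ih.1]
        simp only [List.flatMap_cons, hf, List.singleton_append, if_neg Bool.false_ne_true]
        rw [pvSquash_cons_ne hne, pvRstrip_cons_ne hne]
        simp
      · rw [pvPassRest, if_neg (by push_neg; exact hs), if_neg (by push_neg; exact hp), ih.1]
        simp only [List.flatMap_cons, hf, List.singleton_append, if_pos rfl]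
        rw [pvSquash_underscore_cons_ne hne, pvSquash_cons_ne hne,
            pvRstrip_underscore_cons_ne hne]
        simp

-- edge-case bridge: a leading separator disappears on both sides
theorem pvStrip_squash_underscore (m : List Char) :
    PySem.Chars.stripChars (pvSquash ('_' :: m)) ['_']
      = PySem.Chars.stripChars (pvSquash m) ['_'] := by
  cases m with
  | nil => decide
  | cons c u =>
    by_cases hc : c = '_'
    · subst hc; rw [pvSquash_cons2_underscore]
    · rw [pvSquash_underscore_cons_ne hc, pvStrip_cons_underscore]

-- B's pass equals A's strip∘squash of the flatMap image
theorem pvPassLead_eq : ∀ t : List Char,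
    pvPassLead t = PySem.Chars.stripChars (pvSquash (t.flatMap pvF)) ['_'] := by
  intro t
  induction t with
  | nil => rfl
  | cons c u ih =>
    by_cases hs : c = ' ' ∨ c = '-' ∨ c = '.' ∨ c = '_'
    · have hf : pvF c = ['_'] := by simp [pvF, hs]
      rw [pvPassLead, if_pos hs, ih]
      simp only [List.flatMap_cons, hf, List.singleton_append]
      rw [pvStrip_squash_underscore]
    by_cases hp : c = '(' ∨ c = ')'
    · have hf : pvF c = [] := by
        push_neg at hs
        simp [pvF, hs.1, hs.2.1, hs.2.2.1, hs.2.2.2, hp]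
      rw [pvPassLead, if_neg hs, if_pos hp, ih]
      simp [hf]
    · push_neg at hs hp
      have hne : c ≠ '_' := hs.2.2.2
      have hf : pvF c = [c] := by
        simp [pvF, hs.1, hs.2.1, hs.2.2.1, hs.2.2.2, hp.1, hp.2]
      rw [pvPassLead, if_neg (by push_neg; exact hs), if_neg (by push_neg; exact hp)]
      simp only [List.flatMap_cons, hf, List.singleton_append]
      rw [pvSquash_cons_ne hne, pvStrip_cons_ne hne, (pvPassRest_eq u).1]

-- the heart: A's pipeline equals B's single pass, per cleaned string
theorem pvCore (s : String) :
    PySem.Str.stripChars (pvWhileCollapse (PySem.Str.replace (PySem.Str.replace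
      (PySem.Str.replace (PySem.Str.replace (PySem.Str.replace s " " "_") "-" "_") "." "_")
      "(" "") ")" "")) "_"
    = String.ofList ((s.toList.foldl pvScanStep ([], false)).1) := by
  apply String.toList_inj.mp
  rw [PySem.Str.toList_stripChars]
  show PySem.Chars.stripChars _ ['_'] = _
  rw [pvWhileCollapse_toList, pvChain_eq, String.toList_ofList,
      pvFoldl_scan_nil, pvPassLead_eq]

-- ===== VERDICT (by name: the statement is the Claim_ definition above) =====
theorem normalize_mesh_id_spec : Claim_equal_normalize_mesh_id := by
  intro name _
  show normalize_mesh_id name = normalize_mesh_id_alt name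
  unfold normalize_mesh_id normalize_mesh_id_alt
  simp only [pvSideLoop]
  have el : -(PySem.Str.len ".l") = (-2 : Int) := by decide
  have er : -(PySem.Str.len ".r") = (-2 : Int) := by decide
  by_cases h1 : PySem.Str.endswith (PySem.Str.lower name) ".l" = true
  · simp only [h1, reduceIte, el]
    rw [pvCore]
  by_cases h2 : PySem.Str.endswith (PySem.Str.lower name) ".r" = true
  · simp only [h1, h2, Bool.false_eq_true, reduceIte, er]
    rw [pvCore]
  · simp only [h1, h2, Bool.false_eq_true, reduceIte]
    rw [pvCore]
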